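-- pv_equiv track=rewrite | github.com/gatocor/treeclust | treeclust/plotting/multiresolution_graph.py | _local_crossing_optimization
-- ===== SOURCE A (Python) =====
-- from typing import Optional, Tuple, Union, Dict, List, Any
--
-- def _local_crossing_optimization(node_order: List, prev_nodes: List,
--                                 edge_dict: Dict, positions: Dict, max_iterations: int = 10) -> List:
--     """
--     Apply local search to minimize crossings by swapping adjacent nodes.
--     """
--
--     current_order = node_order.copy()
--
--     for iteration in range(max_iterations):
--         improved = False
--
--         # Try swapping adjacent pairs
--         for i in range(len(current_order) - 1):
--             # Calculate crossings before swap
--             crossings_before = _count_crossings_for_pair(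
--                 current_order, i, i+1, prev_nodes, edge_dict, positions
--             )
--
--             # Swap and calculate crossings after
--             current_order[i], current_order[i+1] = current_order[i+1], current_order[i]
--             crossings_after = _count_crossings_for_pair(
--                 current_order, i, i+1, prev_nodes, edge_dict, positions
--             )
--
--             # Keep swap if it reduces crossings
--             if crossings_after < crossings_before:
--                 improved = True
--             else:
--                 # Revert swap
--                 current_order[i], current_order[i+1] = current_order[i+1], current_order[i]
--
--         # Stop if no improvement
--         if not improved:
--             break
--
--     return current_order
--
-- def _count_crossings_for_pair(node_order: List, idx1: int, idx2: int,
--                              prev_nodes: List, edge_dict: Dict, positions: Dict) -> int: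
--     """
--     Count crossings caused by edges from two specific nodes.
--     """
--
--     node1 = node_order[idx1]
--     node2 = node_order[idx2]
--
--     crossings = 0
--
--     # Get connections for both nodes
--     connections1 = []
--     connections2 = []
--
--     if node1 in edge_dict:
--         for connected_node, weight in edge_dict[node1]:
--             if connected_node in prev_nodes and connected_node in positions:
--                 connections1.append(positions[connected_node][0])
--
--     if node2 in edge_dict:
--         for connected_node, weight in edge_dict[node2]:
--             if connected_node in prev_nodes and connected_node in positions:
--                 connections2.append(positions[connected_node][0])
--
--     # Count crossings between edges from node1 and node2
--     for pos1 in connections1: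
--         for pos2 in connections2:
--             # Check if edges cross (considering node1 is to the left of node2)
--             if idx1 < idx2 and pos1 > pos2:  # node1 left, but connects to right
--                 crossings += 1
--             elif idx1 > idx2 and pos1 < pos2:  # node1 right, but connects to left
--                 crossings += 1
--
--     return crossings
-- ===== SOURCE B (Python) =====
-- from typing import Dict, List
--
--
-- def _local_crossing_optimization(node_order: List, prev_nodes: List,
--                                  edge_dict: Dict, positions: Dict, max_iterations: int = 10) -> List:
--     """
--     Same greedy adjacent-swap crossing minimization, but with the per-node
--     connection positions precomputed once and sorted, so each pair decision is
--     a linear merge count instead of a quadratic nested scan.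
--     """
--     order = list(node_order)
--     if len(order) < 2 or max_iterations < 1:
--         return order
--
--     prev = set(prev_nodes)
--     conn = {}
--     for u in order:
--         if u not in conn:
--             conn[u] = sorted(positions[c][0]
--                              for c, _w in edge_dict.get(u, ())
--                              if c in prev and c in positions)
--
--     def cross(a, b):
--         # number of pairs (p, q) with p in conn[a], q in conn[b], p > q
--         xs, ys = conn[a], conn[b]
--         j, total = 0, 0
--         for p in xs:
--             while j < len(ys) and ys[j] < p:
--                 j += 1
--             total += j
--         return total
--
--     for _ in range(max_iterations):
--         improved = False
--         res = []
--         carry = order[0]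
--         for nxt in order[1:]:
--             if cross(nxt, carry) < cross(carry, nxt):
--                 res.append(nxt)
--                 improved = True
--             else:
--                 res.append(carry)
--                 carry = nxt
--         res.append(carry)
--         order = res
--         if not improved:
--             break
--     return order
-- ===== Notes on version B (the rewrite author's own statement) =====
-- stated objective: faster
-- what changed: B precomputes each node's connection-position list once (sorted, with prev_nodes as a set) instead of rebuilding it for every adjacent pair in every iteration, counts the crossings of a pair by a linear merge over the two sorted lists instead of a quadratic nested scan, and performs each sweep as a single carry pass building a new list instead of index-based in-place swaps.
import Mathlib
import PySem

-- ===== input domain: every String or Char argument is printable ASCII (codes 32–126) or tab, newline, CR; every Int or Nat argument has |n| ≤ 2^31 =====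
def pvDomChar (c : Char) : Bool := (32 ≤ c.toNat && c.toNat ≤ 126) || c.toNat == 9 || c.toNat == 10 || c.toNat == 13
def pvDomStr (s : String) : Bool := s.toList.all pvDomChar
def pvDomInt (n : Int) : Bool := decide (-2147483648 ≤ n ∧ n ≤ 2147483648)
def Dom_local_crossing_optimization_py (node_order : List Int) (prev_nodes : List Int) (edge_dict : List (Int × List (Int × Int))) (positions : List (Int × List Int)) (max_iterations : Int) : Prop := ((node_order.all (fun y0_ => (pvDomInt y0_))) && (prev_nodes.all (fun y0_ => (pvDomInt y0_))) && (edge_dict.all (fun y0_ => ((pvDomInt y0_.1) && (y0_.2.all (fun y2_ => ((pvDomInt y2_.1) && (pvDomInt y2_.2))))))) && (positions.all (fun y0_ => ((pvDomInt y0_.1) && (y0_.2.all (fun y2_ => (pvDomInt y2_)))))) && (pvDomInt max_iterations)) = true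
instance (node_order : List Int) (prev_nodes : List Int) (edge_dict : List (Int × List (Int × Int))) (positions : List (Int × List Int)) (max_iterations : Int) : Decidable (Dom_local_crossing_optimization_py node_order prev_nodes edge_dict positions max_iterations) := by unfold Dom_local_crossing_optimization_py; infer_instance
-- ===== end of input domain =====

-- B precomputes each node's sorted connection-position list once and decides each adjacent
-- swap by a linear merge count over the two sorted lists, instead of A's per-pair rebuild
-- and quadratic nested scan (objective: faster).

-- ===== PORT A =====

-- connections of one node, as built inside _count_crossings_for_pair
def pvConnsA (prev_nodes : List Int) (edge_dict : List (Int × List (Int × Int))) (positions : List (Int × List Int)) (node : Int) : List Int :=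
  match (PySem.Dict.mk edge_dict).get? node with
  | none => []
  | some edges =>
    edges.foldl (fun acc cw =>
      if cw.1 ∈ prev_nodes ∧ ((PySem.Dict.mk positions).get? cw.1).isSome = true then
        -- positions[c][0]; the `.getD 0` default is unreachable under Pre_ (Python raises IndexError there)
        acc ++ [(PySem.List.pyGet? (((PySem.Dict.mk positions).get? cw.1).getD []) 0).getD 0]
      else acc) []

-- _count_crossings_for_pair (indices always in range at the call sites, so `.getD 0` is unreachable)
def pvCountCrossingsForPair (node_order : List Int) (idx1 idx2 : Int) (prev_nodes : List Int) (edge_dict : List (Int × List (Int × Int))) (positions : List (Int × List Int)) : Int :=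
  let node1 := (PySem.List.pyGet? node_order idx1).getD 0
  let node2 := (PySem.List.pyGet? node_order idx2).getD 0
  let c1 := pvConnsA prev_nodes edge_dict positions node1
  let c2 := pvConnsA prev_nodes edge_dict positions node2
  c1.foldl (fun cr p => c2.foldl (fun cr q =>
    if idx1 < idx2 ∧ p > q then cr + 1
    else if idx2 < idx1 ∧ p < q then cr + 1
    else cr) cr) 0

-- current_order[i], current_order[i+1] = current_order[i+1], current_order[i]
-- (i comes from range(len-1), so it is nonnegative and `.toNat` is exact)
def pvSwapAdjA (order : List Int) (i : Int) : List Int :=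
  let a := (PySem.List.pyGet? order (i + 1)).getD 0
  let b := (PySem.List.pyGet? order i).getD 0
  (order.set i.toNat a).set (i + 1).toNat b

-- body of `for i in range(len(current_order) - 1)` (swap, compare, keep or revert)
def pvStepA (prev_nodes : List Int) (edge_dict : List (Int × List (Int × Int))) (positions : List (Int × List Int)) (st : List Int × Bool) (i : Int) : List Int × Bool :=
  let before := pvCountCrossingsForPair st.1 i (i + 1) prev_nodes edge_dict positions
  let sw := pvSwapAdjA st.1 i
  let after := pvCountCrossingsForPair sw i (i + 1) prev_nodes edge_dict positions
  if after < before then (sw, true) else (pvSwapAdjA sw i, st.2)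

-- one pass of `for i in range(len(current_order) - 1)`
def pvSweepA (prev_nodes : List Int) (edge_dict : List (Int × List (Int × Int))) (positions : List (Int × List Int)) (order : List Int) : List Int × Bool :=
  (PySem.List.pyRange 0 ((order.length : Int) - 1) 1).foldl (pvStepA prev_nodes edge_dict positions) (order, false)

-- `for iteration in range(max_iterations): … if not improved: break`
def pvLoopA (prev_nodes : List Int) (edge_dict : List (Int × List (Int × Int))) (positions : List (Int × List Int)) : Nat → List Int → List Int
  | 0, order => order
  | k + 1, order =>
    let r := pvSweepA prev_nodes edge_dict positions order
    if r.2 = true then pvLoopA prev_nodes edge_dict positions k r.1 else r.1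

def local_crossing_optimization_py (node_order : List Int) (prev_nodes : List Int) (edge_dict : List (Int × List (Int × Int))) (positions : List (Int × List Int)) (max_iterations : Int) : List Int :=
  pvLoopA prev_nodes edge_dict positions max_iterations.toNat node_order

-- ===== PORT B =====

-- sorted(positions[c][0] for c, _w in edge_dict.get(u, ()) if c in prev and c in positions)
def pvConnB (prev_nodes : List Int) (edge_dict : List (Int × List (Int × Int))) (positions : List (Int × List Int)) (u : Int) : List Int :=
  PySem.List.sorted
    ((((PySem.Dict.mk edge_dict).get? u).getD []).filterMap (fun cw =>
      if cw.1 ∈ prev_nodes ∧ ((PySem.Dict.mk positions).get? cw.1).isSome = true then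
        some ((PySem.List.pyGet? (((PySem.Dict.mk positions).get? cw.1).getD []) 0).getD 0)
      else none))
    (fun x => x) false

-- `for u in order: if u not in conn: conn[u] = …`
def pvBuildConn (prev_nodes : List Int) (edge_dict : List (Int × List (Int × Int))) (positions : List (Int × List Int)) (order : List Int) : PySem.Dict Int (List Int) :=
  order.foldl (fun d u => if d.contains u = true then d else d.insert u (pvConnB prev_nodes edge_dict positions u)) PySem.Dict.empty

-- `while j < len(ys) and ys[j] < p: j += 1`
def pvAdv (ys : List Int) (p : Int) (j : Nat) : Nat :=
  if h : j < ys.length then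
    if ys[j] < p then pvAdv ys p (j + 1) else j
  else j
termination_by ys.length - j

-- cross(a, b): merge count of pairs p ∈ conn[a], q ∈ conn[b] with p > q
-- (conn[a] is always present at the call sites; `.getD []` stands for the never-raised KeyError)
def pvCrossB (conn : PySem.Dict Int (List Int)) (a b : Int) : Int :=
  let xs := conn.getD a []
  let ys := conn.getD b []
  (xs.foldl (fun st p => let j := pvAdv ys p st.1; (j, st.2 + (j : Int))) ((0 : Nat), (0 : Int))).2

-- loop body of the carry pass
def pvStepB (conn : PySem.Dict Int (List Int)) (st : List Int × Int × Bool) (nxt : Int) : List Int × Int × Bool :=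
  if pvCrossB conn nxt st.2.1 < pvCrossB conn st.2.1 nxt then (st.1 ++ [nxt], st.2.1, true)
  else (st.1 ++ [st.2.1], nxt, st.2.2)

-- one sweep: carry pass over order[1:] building res, then res.append(carry)
def pvSweepB (conn : PySem.Dict Int (List Int)) (order : List Int) : List Int × Bool :=
  let carry := (PySem.List.pyGet? order 0).getD 0
  let st := (PySem.List.slice order (some 1) none).foldl (pvStepB conn) ([], carry, false)
  (st.1 ++ [st.2.1], st.2.2)

def pvLoopB (conn : PySem.Dict Int (List Int)) : Nat → List Int → List Int
  | 0, order => order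
  | k + 1, order =>
    let r := pvSweepB conn order
    if r.2 = true then pvLoopB conn k r.1 else r.1

def local_crossing_optimization_py_alt (node_order : List Int) (prev_nodes : List Int) (edge_dict : List (Int × List (Int × Int))) (positions : List (Int × List Int)) (max_iterations : Int) : List Int :=
  if node_order.length < 2 ∨ max_iterations < 1 then node_order
  else pvLoopB (pvBuildConn prev_nodes edge_dict positions node_order) max_iterations.toNat node_order

-- ===== PRECONDITION & SPEC =====

-- Pre_ excludes exactly the inputs on which the Python A raises IndexError: when the loops
-- actually run (≥ 2 nodes and ≥ 1 iteration), every connection of a node of node_order that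
-- lies in prev_nodes and in positions must have a nonempty positions entry (A reads
-- positions[c][0]).  (`.getD [0]` encodes "if the key is present, its list is nonempty".)
def Pre_local_crossing_optimization_py (node_order : List Int) (prev_nodes : List Int) (edge_dict : List (Int × List (Int × Int))) (positions : List (Int × List Int)) (max_iterations : Int) : Prop :=
  2 ≤ node_order.length → 1 ≤ max_iterations →
    ∀ u ∈ node_order, ∀ e ∈ ((PySem.Dict.mk edge_dict).get? u).getD [],
      e.1 ∈ prev_nodes → ((PySem.Dict.mk positions).get? e.1).getD [0] ≠ []
instance (node_order : List Int) (prev_nodes : List Int) (edge_dict : List (Int × List (Int × Int))) (positions : List (Int × List Int)) (max_iterations : Int) : Decidable (Pre_local_crossing_optimization_py node_order prev_nodes edge_dict positions max_iterations) := by unfold Pre_local_crossing_optimization_py; infer_instance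

def pvWitness_local_crossing_optimization_py : List Int × List Int × (List (Int × List (Int × Int))) × (List (Int × List Int)) × Int :=
  ([0, 1], [2], [(0, [(2, 1)])], [(2, [3])], 2)

def Spec_local_crossing_optimization_py (node_order : List Int) (prev_nodes : List Int) (edge_dict : List (Int × List (Int × Int))) (positions : List (Int × List Int)) (max_iterations : Int) (out : List Int) : Prop := out = local_crossing_optimization_py_alt node_order prev_nodes edge_dict positions max_iterations
instance (node_order : List Int) (prev_nodes : List Int) (edge_dict : List (Int × List (Int × Int))) (positions : List (Int × List Int)) (max_iterations : Int) (out : List Int) : Decidable (Spec_local_crossing_optimization_py node_order prev_nodes edge_dict positions max_iterations out) := by unfold Spec_local_crossing_optimization_py; infer_instance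

-- ===== CLAIM (what is proved, stated in full; the proofs are below) =====
def Claim_equal_local_crossing_optimization_py : Prop := ∀ (node_order : List Int) (prev_nodes : List Int) (edge_dict : List (Int × List (Int × Int))) (positions : List (Int × List Int)) (max_iterations : Int), Dom_local_crossing_optimization_py node_order prev_nodes edge_dict positions max_iterations → Pre_local_crossing_optimization_py node_order prev_nodes edge_dict positions max_iterations → Spec_local_crossing_optimization_py node_order prev_nodes edge_dict positions max_iterations (local_crossing_optimization_py node_order prev_nodes edge_dict positions max_iterations)

-- ===== LEMMAS AND PROOFS =====
-- (The two Lean ports are total — the spots where Python raises are `.getD` defaults that both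
--  ports take identically — so the equivalence below holds without consuming Pre_; Pre_'s role
--  is to exclude the inputs where the Python A raises IndexError.)

-- number of crossings A charges to the ordered node pair (u, v): Σ_{p ∈ conns u} #{q ∈ conns v | q < p}
def pvKA (prev_nodes : List Int) (edge_dict : List (Int × List (Int × Int))) (positions : List (Int × List Int)) (u v : Int) : Int :=
  ((pvConnsA prev_nodes edge_dict positions u).map
    (fun p => ((pvConnsA prev_nodes edge_dict positions v).countP (fun q => decide (q < p)) : Int))).sum

-- abstract one-sweep carry recursion, parametrised by the swap decision
def pvCw (cmp : Int → Int → Bool) : Int → List Int → List Int × Bool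
  | u, [] => ([u], false)
  | u, x :: r => if cmp x u then ((x :: (pvCw cmp u r).1), true) else ((u :: (pvCw cmp x r).1), (pvCw cmp x r).2)

def pvCmpA (prev_nodes : List Int) (edge_dict : List (Int × List (Int × Int))) (positions : List (Int × List Int)) (x u : Int) : Bool :=
  decide (pvKA prev_nodes edge_dict positions x u < pvKA prev_nodes edge_dict positions u x)

def pvCmpB (conn : PySem.Dict Int (List Int)) (x u : Int) : Bool :=
  decide (pvCrossB conn x u < pvCrossB conn u x)

lemma pv_countP_prefix_lt (ys : List Int) (hys : ys.Pairwise (· ≤ ·)) (p : Int) (i : Nat)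
    (hi : i < ys.countP (fun q => decide (q < p))) : ∃ h : i < ys.length, ys[i] < p := by
  induction ys generalizing i with
  | nil => simp at hi
  | cons y t ih =>
    rw [List.pairwise_cons] at hys
    by_cases hy : y < p
    · cases i with
      | zero => exact ⟨by simp, by simpa using hy⟩
      | succ i' =>
        have hi' : i' < t.countP (fun q => decide (q < p)) := by
          rw [List.countP_cons] at hi; simp [hy] at hi; omega
        obtain ⟨h1, h2⟩ := ih hys.2 i' hi'
        exact ⟨by simpa using Nat.succ_lt_succ h1, by simpa using h2⟩
    · exfalso
      have h0 : t.countP (fun q => decide (q < p)) = 0 := by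
        rw [List.countP_eq_zero]
        intro q hq
        have := hys.1 q hq
        simp; omega
      rw [List.countP_cons] at hi
      simp [hy, h0] at hi

lemma pv_adv_eq (ys : List Int) (hys : ys.Pairwise (· ≤ ·)) (p : Int) (j : Nat)
    (hj : j ≤ ys.length) (hpre : ∀ i (h : i < ys.length), i < j → ys[i] < p) :
    pvAdv ys p j = ys.countP (fun q => decide (q < p)) := by
  by_cases h : j < ys.length
  · by_cases hlt : ys[j] < p
    · rw [pvAdv, dif_pos h, if_pos hlt]
      exact pv_adv_eq ys hys p (j + 1) (by omega) (by
        intro i hilen hij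
        rcases Nat.lt_or_ge i j with hij' | hij'
        · exact hpre i hilen hij'
        · have : i = j := by omega
          subst this; exact hlt)
    · rw [pvAdv, dif_pos h, if_neg hlt]
      -- countP = countP (take j) + countP (drop j) = j + 0
      have hsplit := List.take_append_drop j ys
      have hc : ys.countP (fun q => decide (q < p))
          = (ys.take j).countP (fun q => decide (q < p)) + (ys.drop j).countP (fun q => decide (q < p)) := by
        conv_lhs => rw [← hsplit]
        rw [List.countP_append]
      have hgetelem := List.pairwise_iff_getElem.mp hys
      have htake : (ys.take j).countP (fun q => decide (q < p)) = j := by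
        have hlen : (ys.take j).length = j := by simp; omega
        refine (List.countP_eq_length.mpr ?_).trans hlen
        intro a ha
        obtain ⟨i, hi, hie⟩ := List.mem_iff_getElem.mp ha
        have hij : i < j := by omega
        have : (ys.take j)[i] = ys[i]'(by omega) := List.getElem_take
        rw [this] at hie
        rw [← hie]
        simpa using hpre i (by omega) hij
      have hdrop : (ys.drop j).countP (fun q => decide (q < p)) = 0 := by
        rw [List.countP_eq_zero]
        intro a ha
        obtain ⟨m, hm, hme⟩ := List.mem_iff_getElem.mp ha
        have hmlen : j + m < ys.length := by simp at hm; omega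
        have : (ys.drop j)[m] = ys[j + m]'hmlen := by
          simp [List.getElem_drop]
        rw [this] at hme
        rw [← hme]
        rcases Nat.eq_zero_or_pos m with hm0 | hm0
        · subst hm0; simpa using hlt
        · have := hgetelem j (j + m) h hmlen (by omega)
          simp; omega
      omega
  · rw [pvAdv, dif_neg h]
    have hj' : j = ys.length := by omega
    subst hj'
    rw [Eq.comm, List.countP_eq_length]
    intro a ha
    obtain ⟨i, hi, hie⟩ := List.mem_iff_getElem.mp ha
    rw [← hie]
    simpa using hpre i hi hi
termination_by ys.length - j

lemma pv_merge_fold (ys : List Int) (hys : ys.Pairwise (· ≤ ·)) :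
    ∀ (xs : List Int), xs.Pairwise (· ≤ ·) → ∀ (j : Nat) (t : Int), j ≤ ys.length →
    (∀ p ∈ xs, ∀ i (h : i < ys.length), i < j → ys[i] < p) →
    (xs.foldl (fun st p => (pvAdv ys p st.1, st.2 + (pvAdv ys p st.1 : Int))) (j, t)).2
      = t + (xs.map (fun p => (ys.countP (fun q => decide (q < p)) : Int))).sum := by
  intro xs hxs
  induction xs with
  | nil => intro j t _ _; simp
  | cons p xs' ih =>
    intro j t hj hpre
    rw [List.pairwise_cons] at hxs
    have hadv : pvAdv ys p j = ys.countP (fun q => decide (q < p)) :=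
      pv_adv_eq ys hys p j hj (fun i h hij => hpre p (by simp) i h hij)
    simp only [List.foldl_cons]
    rw [hadv]
    rw [ih hxs.2 _ _ List.countP_le_length ?_]
    · simp [List.map_cons, List.sum_cons]; ring
    · intro p' hp' i hilen hij
      obtain ⟨h1, h2⟩ := pv_countP_prefix_lt ys hys p i hij
      exact lt_of_lt_of_le h2 (hxs.1 p' hp')

lemma pv_filterMap_if {α β : Type} (l : List α) (p : α → Bool) (f : α → β) :
    l.filterMap (fun x => if p x = true then some (f x) else none) = (l.filter p).map f := by
  induction l with
  | nil => rfl
  | cons a t ih => by_cases h : p a <;> simp [h, ih]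

lemma pv_connB_eq (pn : List Int) (ed : List (Int × List (Int × Int))) (ps : List (Int × List Int)) (u : Int) :
    pvConnB pn ed ps u = PySem.List.sorted (pvConnsA pn ed ps u) (fun x => x) false := by
  unfold pvConnB pvConnsA
  cases hget : (PySem.Dict.mk ed).get? u with
  | none => rfl
  | some edges =>
    simp only [Option.getD_some]
    congr 1
    have hfun2 : (fun (cw : Int × Int) =>
        if cw.1 ∈ pn ∧ ((PySem.Dict.mk ps).get? cw.1).isSome = true then
          some ((PySem.List.pyGet? (((PySem.Dict.mk ps).get? cw.1).getD []) 0).getD 0)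
        else none)
        = fun cw => if (fun (cw : Int × Int) => decide (cw.1 ∈ pn ∧ ((PySem.Dict.mk ps).get? cw.1).isSome = true)) cw = true then
            some ((PySem.List.pyGet? (((PySem.Dict.mk ps).get? cw.1).getD []) 0).getD 0) else none := by
      funext cw; simp
    rw [hfun2, pv_filterMap_if]
    have hfun : (fun (acc : List Int) (cw : Int × Int) =>
        if cw.1 ∈ pn ∧ ((PySem.Dict.mk ps).get? cw.1).isSome = true then
          acc ++ [(PySem.List.pyGet? (((PySem.Dict.mk ps).get? cw.1).getD []) 0).getD 0]
        else acc)
        = fun acc cw => if (fun (cw : Int × Int) => decide (cw.1 ∈ pn ∧ ((PySem.Dict.mk ps).get? cw.1).isSome = true)) cw = true then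
            acc ++ [(fun (cw : Int × Int) => (PySem.List.pyGet? (((PySem.Dict.mk ps).get? cw.1).getD []) 0).getD 0) cw] else acc := by
      funext acc cw; simp
    rw [hfun, PySem.List.foldl_append_if]
    simp

lemma pv_crossB_eq (pn : List Int) (ed : List (Int × List (Int × Int))) (ps : List (Int × List Int))
    (conn : PySem.Dict Int (List Int)) (a b : Int)
    (ha : conn.getD a [] = pvConnB pn ed ps a) (hb : conn.getD b [] = pvConnB pn ed ps b) :
    pvCrossB conn a b = pvKA pn ed ps a b := by
  unfold pvCrossB
  rw [ha, hb, pv_connB_eq, pv_connB_eq]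
  have hxs : (PySem.List.sorted (pvConnsA pn ed ps a) (fun x => x) false).Pairwise (· ≤ ·) := by
    simpa using PySem.List.sorted_pairwise (pvConnsA pn ed ps a) (fun x => x)
  have hys : (PySem.List.sorted (pvConnsA pn ed ps b) (fun x => x) false).Pairwise (· ≤ ·) := by
    simpa using PySem.List.sorted_pairwise (pvConnsA pn ed ps b) (fun x => x)
  have hmf := pv_merge_fold (PySem.List.sorted (pvConnsA pn ed ps b) (fun x => x) false) hys
    (PySem.List.sorted (pvConnsA pn ed ps a) (fun x => x) false) hxs 0 0 (by omega)
    (by intro p hp i h hij; omega)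
  refine Eq.trans hmf ?_
  rw [zero_add]
  have hpermA : (PySem.List.sorted (pvConnsA pn ed ps a) (fun x => x) false).Perm (pvConnsA pn ed ps a) :=
    PySem.List.sorted_perm _ _ _
  have hpermB : (PySem.List.sorted (pvConnsA pn ed ps b) (fun x => x) false).Perm (pvConnsA pn ed ps b) :=
    PySem.List.sorted_perm _ _ _
  unfold pvKA
  have hg : (fun (p : Int) => ((PySem.List.sorted (pvConnsA pn ed ps b) (fun x => x) false).countP (fun q => decide (q < p)) : Int))
      = fun p => ((pvConnsA pn ed ps b).countP (fun q => decide (q < p)) : Int) := by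
    funext p
    exact_mod_cast congrArg Nat.cast (hpermB.countP_eq (fun q => decide (q < p)))
  rw [hg]
  exact (hpermA.map _).sum_eq

lemma pv_build_get_aux (pn : List Int) (ed : List (Int × List (Int × Int))) (ps : List (Int × List Int)) :
    ∀ (order : List Int) (d : PySem.Dict Int (List Int)),
    (∀ k v, d.get? k = some v → v = pvConnB pn ed ps k) →
    ∀ u, (u ∈ order ∨ (d.get? u).isSome = true) →
    (order.foldl (fun d u => if d.contains u = true then d else d.insert u (pvConnB pn ed ps u)) d).get? u
      = some (pvConnB pn ed ps u) := by
  intro order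
  induction order with
  | nil =>
    intro d hinv u hu
    simp only [List.foldl_nil]
    simp only [List.not_mem_nil, false_or] at hu
    cases hg : d.get? u with
    | none => rw [hg] at hu; simp at hu
    | some v => rw [hinv u v hg]
  | cons a order' ih =>
    intro d hinv u hu
    simp only [List.foldl_cons]
    set d' := if d.contains a = true then d else d.insert a (pvConnB pn ed ps a) with hd'
    have hinv' : ∀ k v, d'.get? k = some v → v = pvConnB pn ed ps k := by
      intro k v hk
      by_cases hca : d.contains a = true
      · rw [hd', if_pos hca] at hk; exact hinv k v hk
      · rw [hd', if_neg hca, PySem.Dict.get?_insert] at hk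
        by_cases hka : k = a
        · simp [hka] at hk; rw [hka, ← hk]
        · simp [hka] at hk; exact hinv k v hk
    apply ih d' hinv'
    rcases hu with hu | hu
    · rcases List.mem_cons.mp hu with hua | hu'
      · right
        subst hua
        rw [← PySem.Dict.contains_eq_isSome_get?, hd']
        by_cases hca : d.contains u = true
        · rw [if_pos hca]; exact hca
        · rw [if_neg hca]; exact PySem.Dict.contains_insert_self _ _ _
      · left; exact hu'
    · right
      rw [← PySem.Dict.contains_eq_isSome_get?] at hu ⊢
      rw [hd']
      by_cases hca : d.contains a = true
      · rw [if_pos hca]; exact hu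
      · rw [if_neg hca, PySem.Dict.contains_insert]
        simp [hu]

lemma pv_build_get (pn : List Int) (ed : List (Int × List (Int × Int))) (ps : List (Int × List Int))
    (order : List Int) (u : Int) (hu : u ∈ order) :
    (pvBuildConn pn ed ps order).get? u = some (pvConnB pn ed ps u) := by
  exact pv_build_get_aux pn ed ps order PySem.Dict.empty
    (by intro k v h; simp at h) u (Or.inl hu)

lemma pv_countA_eq (pn : List Int) (ed : List (Int × List (Int × Int))) (ps : List (Int × List Int))
    (order : List Int) (i : Int) (u v : Int)
    (hu : PySem.List.pyGet? order i = some u) (hv : PySem.List.pyGet? order (i + 1) = some v) :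
    pvCountCrossingsForPair order i (i + 1) pn ed ps = pvKA pn ed ps u v := by
  unfold pvCountCrossingsForPair
  rw [hu, hv]
  simp only [Option.getD_some]
  have hfun : (fun (cr : Int) (p : Int) => (pvConnsA pn ed ps v).foldl
        (fun cr q => if i < i + 1 ∧ p > q then cr + 1 else if i + 1 < i ∧ p < q then cr + 1 else cr) cr)
      = fun cr p => cr + ((pvConnsA pn ed ps v).countP (fun q => decide (q < p)) : Int) := by
    funext cr p
    have hs : (fun (cr q : Int) => if i < i + 1 ∧ p > q then cr + 1 else if i + 1 < i ∧ p < q then cr + 1 else cr)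
        = fun cr q => if (fun (q : Int) => decide (q < p)) q = true then cr + 1 else cr := by
      funext cr q
      simp only [decide_eq_true_eq]
      split_ifs <;> omega
    rw [hs, PySem.List.foldl_if_add_one]
  rw [hfun, PySem.List.foldl_add]
  unfold pvKA
  simp

lemma pv_swap_adj (pre : List Int) (u x : Int) (rest : List Int) :
    pvSwapAdjA (pre ++ u :: x :: rest) (pre.length : Int) = pre ++ x :: u :: rest := by
  have h1 : PySem.List.pyGet? (pre ++ u :: x :: rest) (pre.length : Int) = some u :=
    PySem.List.pyGet?_append_length pre _ u
  have h2 : PySem.List.pyGet? (pre ++ u :: x :: rest) ((pre.length : Int) + 1) = some x := by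
    have e : pre ++ u :: x :: rest = (pre ++ [u]) ++ x :: rest := by simp
    have e2 : ((pre.length : Int) + 1) = (((pre ++ [u]).length : Int)) := by
      simp
    rw [e, e2]
    exact PySem.List.pyGet?_append_length _ _ x
  unfold pvSwapAdjA
  rw [h1, h2]
  simp only [Option.getD_some]
  have t1 : ((pre.length : Int)).toNat = pre.length := by omega
  have t2 : (((pre.length : Int)) + 1).toNat = pre.length + 1 := by omega
  rw [t1, t2]
  have s1 : (pre ++ u :: x :: rest).set pre.length x = pre ++ x :: x :: rest := by
    rw [List.set_append]
    simp
  rw [s1]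
  have s2 : (pre ++ x :: x :: rest).set (pre.length + 1) u = pre ++ x :: u :: rest := by
    rw [List.set_append]
    simp
  rw [s2]

lemma pv_sweepA_eq (pn : List Int) (ed : List (Int × List (Int × Int))) (ps : List (Int × List Int)) :
    ∀ (rest pre : List Int) (u : Int) (imp : Bool),
    (PySem.List.pyRange (pre.length : Int) ((pre.length : Int) + rest.length) 1).foldl
      (pvStepA pn ed ps) (pre ++ u :: rest, imp)
    = (pre ++ (pvCw (pvCmpA pn ed ps) u rest).1, imp || (pvCw (pvCmpA pn ed ps) u rest).2) := by
  intro rest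
  induction rest with
  | nil =>
    intro pre u imp
    rw [show ((pre.length : Int) + (([] : List Int).length : Int)) = (pre.length : Int) by simp]
    rw [PySem.List.pyRange_one_eq_nil (by omega)]
    simp [pvCw]
  | cons x rest' ih =>
    intro pre u imp
    have hcons : PySem.List.pyRange (pre.length : Int) ((pre.length : Int) + ((x :: rest').length : Int)) 1
        = (pre.length : Int) :: PySem.List.pyRange ((pre.length : Int) + 1) ((pre.length : Int) + ((x :: rest').length : Int)) 1 := by
      apply PySem.List.pyRange_one_cons
      simp only [List.length_cons]
      push_cast
      omega
    rw [hcons]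
    have hu : PySem.List.pyGet? (pre ++ u :: x :: rest') (pre.length : Int) = some u :=
      PySem.List.pyGet?_append_length _ _ _
    have hx : PySem.List.pyGet? (pre ++ u :: x :: rest') ((pre.length : Int) + 1) = some x := by
      have e : pre ++ u :: x :: rest' = (pre ++ [u]) ++ x :: rest' := by simp
      have e2 : ((pre.length : Int) + 1) = (((pre ++ [u]).length : Int)) := by simp
      rw [e, e2]; exact PySem.List.pyGet?_append_length _ _ _
    have hu2 : PySem.List.pyGet? (pre ++ x :: u :: rest') (pre.length : Int) = some x :=
      PySem.List.pyGet?_append_length _ _ _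
    have hx2 : PySem.List.pyGet? (pre ++ x :: u :: rest') ((pre.length : Int) + 1) = some u := by
      have e : pre ++ x :: u :: rest' = (pre ++ [x]) ++ u :: rest' := by simp
      have e2 : ((pre.length : Int) + 1) = (((pre ++ [x]).length : Int)) := by simp
      rw [e, e2]; exact PySem.List.pyGet?_append_length _ _ _
    have hbefore := pv_countA_eq pn ed ps (pre ++ u :: x :: rest') (pre.length : Int) u x hu hx
    have hafter := pv_countA_eq pn ed ps (pre ++ x :: u :: rest') (pre.length : Int) x u hu2 hx2
    have hswap := pv_swap_adj pre u x rest'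
    have hswap2 := pv_swap_adj pre x u rest'
    have hstep : pvStepA pn ed ps (pre ++ u :: x :: rest', imp) (pre.length : Int)
        = if pvKA pn ed ps x u < pvKA pn ed ps u x then (pre ++ x :: u :: rest', true)
          else (pre ++ u :: x :: rest', imp) := by
      unfold pvStepA
      simp only [hswap, hswap2, hbefore, hafter]
    rw [List.foldl_cons, hstep]
    by_cases hc : pvKA pn ed ps x u < pvKA pn ed ps u x
    · rw [if_pos hc]
      have e3 : PySem.List.pyRange ((pre.length : Int) + 1) ((pre.length : Int) + ((x :: rest').length : Int)) 1
          = PySem.List.pyRange (((pre ++ [x]).length : Int)) ((((pre ++ [x]).length : Int)) + (rest'.length : Int)) 1 := by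
        congr 1 <;> push_cast <;> simp <;> ring
      rw [e3, show pre ++ x :: u :: rest' = (pre ++ [x]) ++ u :: rest' by simp]
      rw [ih (pre ++ [x]) u true]
      have hcmp : pvCmpA pn ed ps x u = true := by simp [pvCmpA, hc]
      simp [pvCw, hcmp]
    · rw [if_neg hc]
      have e3 : PySem.List.pyRange ((pre.length : Int) + 1) ((pre.length : Int) + ((x :: rest').length : Int)) 1
          = PySem.List.pyRange (((pre ++ [u]).length : Int)) ((((pre ++ [u]).length : Int)) + (rest'.length : Int)) 1 := by
        congr 1 <;> push_cast <;> simp <;> ring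
      rw [e3, show pre ++ u :: x :: rest' = (pre ++ [u]) ++ x :: rest' by simp]
      rw [ih (pre ++ [u]) x imp]
      have hcmp : pvCmpA pn ed ps x u = false := by simp [pvCmpA, hc]
      simp [pvCw, hcmp]

lemma pv_sweepB_eq (conn : PySem.Dict Int (List Int)) :
    ∀ (rest res : List Int) (carry : Int) (imp : Bool),
    ((rest.foldl (pvStepB conn) (res, carry, imp)).1 ++ [(rest.foldl (pvStepB conn) (res, carry, imp)).2.1],
      (rest.foldl (pvStepB conn) (res, carry, imp)).2.2)
    = (res ++ (pvCw (pvCmpB conn) carry rest).1, imp || (pvCw (pvCmpB conn) carry rest).2) := by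
  intro rest
  induction rest with
  | nil => intro res carry imp; simp [pvCw]
  | cons x r ih =>
    intro res carry imp
    by_cases hc : pvCrossB conn x carry < pvCrossB conn carry x
    · have hcmp : pvCmpB conn x carry = true := by simp [pvCmpB, hc]
      rw [List.foldl_cons, show pvStepB conn (res, carry, imp) x = (res ++ [x], carry, true) from by
        simp [pvStepB, hc]]
      rw [ih (res ++ [x]) carry true]
      simp [pvCw, hcmp]
    · have hcmp : pvCmpB conn x carry = false := by simp [pvCmpB, hc]
      rw [List.foldl_cons, show pvStepB conn (res, carry, imp) x = (res ++ [carry], x, imp) from by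
        simp [pvStepB, hc]]
      rw [ih (res ++ [carry]) x imp]
      simp [pvCw, hcmp]

lemma pv_cw_congr (cmp1 cmp2 : Int → Int → Bool) (S : List Int)
    (h : ∀ a ∈ S, ∀ b ∈ S, cmp1 a b = cmp2 a b) :
    ∀ (rest : List Int) (u : Int), u ∈ S → (∀ a ∈ rest, a ∈ S) →
    pvCw cmp1 u rest = pvCw cmp2 u rest := by
  intro rest
  induction rest with
  | nil => intro u _ _; rfl
  | cons x r ih =>
    intro u huS hsub
    have hx : x ∈ S := hsub x (by simp)
    have hcmp := h x hx u huS
    have ih1 := ih u huS (fun a ha => hsub a (List.mem_cons_of_mem _ ha))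
    have ih2 := ih x hx (fun a ha => hsub a (List.mem_cons_of_mem _ ha))
    simp only [pvCw, hcmp, ih1, ih2]

lemma pv_cw_subset (cmp : Int → Int → Bool) :
    ∀ (rest : List Int) (u y : Int), y ∈ (pvCw cmp u rest).1 → y ∈ u :: rest := by
  intro rest
  induction rest with
  | nil => intro u y hy; simpa [pvCw] using hy
  | cons x r ih =>
    intro u y hy
    by_cases hc : cmp x u = true
    · simp only [pvCw, hc, if_pos, List.mem_cons] at hy
      rcases hy with hy | hy
      · simp [hy]
      · have := ih u y hy
        simp only [List.mem_cons] at this ⊢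
        tauto
    · rw [Bool.not_eq_true] at hc
      simp only [pvCw, hc, Bool.false_eq_true, if_false, List.mem_cons] at hy
      rcases hy with hy | hy
      · simp [hy]
      · have := ih x y hy
        simp only [List.mem_cons] at this ⊢
        tauto

lemma pv_cw_ne_nil (cmp : Int → Int → Bool) (u : Int) (rest : List Int) : (pvCw cmp u rest).1 ≠ [] := by
  cases rest with
  | nil => simp [pvCw]
  | cons x r => by_cases hc : cmp x u = true <;> simp [pvCw, hc]

lemma pv_loop_eq (pn : List Int) (ed : List (Int × List (Int × Int))) (ps : List (Int × List Int))
    (order0 : List Int) :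
    ∀ (k : Nat) (order : List Int), order ≠ [] → (∀ a ∈ order, a ∈ order0) →
    pvLoopA pn ed ps k order = pvLoopB (pvBuildConn pn ed ps order0) k order := by
  intro k
  induction k with
  | zero => intro order _ _; rfl
  | succ k ih =>
    intro order hne hsub
    obtain ⟨u, rest, rfl⟩ : ∃ u rest, order = u :: rest := by
      cases order with
      | nil => exact absurd rfl hne
      | cons u rest => exact ⟨u, rest, rfl⟩
    have hA : pvSweepA pn ed ps (u :: rest)
        = ((pvCw (pvCmpA pn ed ps) u rest).1, (pvCw (pvCmpA pn ed ps) u rest).2) := by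
      unfold pvSweepA
      have e : PySem.List.pyRange 0 (((u :: rest).length : Int) - 1) 1
          = PySem.List.pyRange ((([] : List Int).length : Int)) ((([] : List Int).length : Int) + (rest.length : Int)) 1 := by
        congr 1 <;> push_cast <;> simp
      rw [e]
      simpa using pv_sweepA_eq pn ed ps rest [] u false
    have hB : pvSweepB (pvBuildConn pn ed ps order0) (u :: rest)
        = ((pvCw (pvCmpB (pvBuildConn pn ed ps order0)) u rest).1, (pvCw (pvCmpB (pvBuildConn pn ed ps order0)) u rest).2) := by
      unfold pvSweepB
      rw [show PySem.List.slice (u :: rest) (some 1) none = rest from by simp [PySem.List.slice]]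
      rw [show PySem.List.pyGet? (u :: rest) 0 = some u from PySem.List.pyGet?_zero_cons u rest]
      simpa using pv_sweepB_eq (pvBuildConn pn ed ps order0) rest [] u false
    have haux : ∀ c ∈ order0, (pvBuildConn pn ed ps order0).getD c [] = pvConnB pn ed ps c := by
      intro c hc
      rw [PySem.Dict.getD_eq_get?_getD, pv_build_get pn ed ps order0 c hc]
      rfl
    have hagree : ∀ a ∈ order0, ∀ b ∈ order0,
        pvCmpB (pvBuildConn pn ed ps order0) a b = pvCmpA pn ed ps a b := by
      intro a ha b hb
      unfold pvCmpB pvCmpA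
      rw [pv_crossB_eq pn ed ps _ a b (haux a ha) (haux b hb),
          pv_crossB_eq pn ed ps _ b a (haux b hb) (haux a ha)]
    have hcw : pvCw (pvCmpB (pvBuildConn pn ed ps order0)) u rest = pvCw (pvCmpA pn ed ps) u rest :=
      pv_cw_congr _ _ order0 hagree rest u (hsub u (by simp)) (fun a ha => hsub a (by simp [ha]))
    simp only [pvLoopA, pvLoopB]
    rw [hA, hB, hcw]
    by_cases hi : (pvCw (pvCmpA pn ed ps) u rest).2 = true
    · simp only [hi, if_pos]
      exact ih _ (pv_cw_ne_nil _ _ _)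
        (fun a ha => hsub a (pv_cw_subset _ rest u a ha))
    · simp [hi]

-- ===== VERDICT (by name: the statement is the Claim_ definition above) =====
theorem local_crossing_optimization_py_spec : Claim_equal_local_crossing_optimization_py := by
  intro node_order prev_nodes edge_dict positions max_iterations _dom _pre
  unfold Spec_local_crossing_optimization_py local_crossing_optimization_py local_crossing_optimization_py_alt
  by_cases hc : node_order.length < 2 ∨ max_iterations < 1
  · rw [if_pos hc]
    rcases hc with hlen | hmi
    · cases hk : max_iterations.toNat with
      | zero => rfl
      | succ k =>
        have hsweep : pvSweepA prev_nodes edge_dict positions node_order = (node_order, false) := by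
          unfold pvSweepA
          rw [PySem.List.pyRange_one_eq_nil (by omega : ((node_order.length : Int) - 1) ≤ 0)]
          rfl
        simp [pvLoopA, hsweep]
    · rw [show max_iterations.toNat = 0 from by omega]
      rfl
  · rw [if_neg hc]
    exact pv_loop_eq prev_nodes edge_dict positions node_order max_iterations.toNat node_order
      (fun h => absurd (Or.inl (by simp [h] : node_order.length < 2)) hc) (fun a ha => ha)
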